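-- pv_equiv track=rewrite | github.com/xkvzmx/lista-3 | lab.py | ordinary_polynomial_value_calc
-- ===== SOURCE A (Python) =====
-- def ordinary_polynomial_value_calc(coeff, arg):
--
--     count_mult, count_add = 0, 0
--     value = 0
--     tab_x = [1 for _ in coeff]
--     for i in range(1, len(coeff)):
--         tab_x[i] = tab_x[i-1] * arg
--         count_mult += 1
--     components = [tab_x[i] * coeff[i] for i in range(len(coeff))]
--     count_mult += len(coeff)
--     for i in range(len(coeff)):
--         value += components[i]
--         count_add += 1
--
--     return value, count_mult, count_add
-- ===== SOURCE B (Python) =====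
-- def ordinary_polynomial_value_calc(coeff, arg):
--     value, power = 0, 1
--     count_mult, count_add = 0, 0
--     for i, c in enumerate(coeff):
--         if i > 0:
--             power *= arg
--             count_mult += 1
--         value += power * c
--         count_mult += 1
--         count_add += 1
--     return value, count_mult, count_add
-- ===== Notes on version B (the rewrite author's own statement) =====
-- stated objective: simpler
-- what changed: Single streaming loop with a running power accumulator replaces three passes and the two materialised lists (tab_x, components).
import Mathlib
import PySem

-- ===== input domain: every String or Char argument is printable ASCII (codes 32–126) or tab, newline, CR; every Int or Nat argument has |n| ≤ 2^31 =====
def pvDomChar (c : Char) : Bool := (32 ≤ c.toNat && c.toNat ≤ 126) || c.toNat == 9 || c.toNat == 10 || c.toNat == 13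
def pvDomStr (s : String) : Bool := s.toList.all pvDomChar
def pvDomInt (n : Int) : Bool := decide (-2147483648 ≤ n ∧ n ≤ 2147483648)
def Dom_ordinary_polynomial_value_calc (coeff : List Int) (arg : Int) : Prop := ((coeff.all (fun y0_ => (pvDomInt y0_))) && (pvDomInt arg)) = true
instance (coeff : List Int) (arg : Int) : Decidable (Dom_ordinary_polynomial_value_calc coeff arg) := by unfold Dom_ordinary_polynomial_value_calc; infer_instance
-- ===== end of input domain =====

-- B replaces A's three passes and two materialised lists by one streaming loop with a
-- running power accumulator; same values and same operation counts (objective: simpler).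

-- ===== PORT A =====
-- literal transliteration of A: tab_x of powers built in place, components list, summation pass
def ordinary_polynomial_value_calc (coeff : List Int) (arg : Int) : Int × Int × Int :=
  let n : Int := (coeff.length : Int)
  -- tab_x = [1 for _ in coeff]
  let tab0 : List Int := coeff.map (fun _ => 1)
  -- for i in range(1, len(coeff)): tab_x[i] = tab_x[i-1] * arg; count_mult += 1
  let s1 : List Int × Int :=
    (PySem.List.pyRange 1 n 1).foldl
      (fun (s : List Int × Int) (i : Int) =>
        (PySem.List.pySetD s.1 i (PySem.List.pyGetD s.1 (i - 1) 0 * arg), s.2 + 1))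
      (tab0, 0)
  -- components = [tab_x[i] * coeff[i] for i in range(len(coeff))]
  let components : List Int :=
    (PySem.List.pyRange 0 n 1).map
      (fun i => PySem.List.pyGetD s1.1 i 0 * PySem.List.pyGetD coeff i 0)
  -- count_mult += len(coeff)
  let cm : Int := s1.2 + n
  -- for i in range(len(coeff)): value += components[i]; count_add += 1
  let s2 : Int × Int :=
    (PySem.List.pyRange 0 n 1).foldl
      (fun (s : Int × Int) (i : Int) =>
        (s.1 + PySem.List.pyGetD components i 0, s.2 + 1))
      (0, 0)
  (s2.1, cm, s2.2)

-- ===== PORT B =====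
-- literal transliteration of B: one fold over coeff; the state carries
-- (value, power, count_mult, count_add, i) — i is enumerate's index
def ordinary_polynomial_value_calc_alt (coeff : List Int) (arg : Int) : Int × Int × Int :=
  let fin : Int × Int × Int × Int × Int :=
    coeff.foldl
      (fun (s : Int × Int × Int × Int × Int) (c : Int) =>
        let (value, power, cm, ca, i) := s
        let (power, cm) := if i > 0 then (power * arg, cm + 1) else (power, cm)
        (value + power * c, power, cm + 1, ca + 1, i + 1))
      (0, 1, 0, 0, 0)
  (fin.1, fin.2.2.1, fin.2.2.2.1)

-- ===== PRECONDITION & SPEC =====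
def Spec_ordinary_polynomial_value_calc (coeff : List Int) (arg : Int) (out : Int × Int × Int) : Prop := out = ordinary_polynomial_value_calc_alt coeff arg
instance (coeff : List Int) (arg : Int) (out : Int × Int × Int) : Decidable (Spec_ordinary_polynomial_value_calc coeff arg out) := by unfold Spec_ordinary_polynomial_value_calc; infer_instance

-- ===== CLAIM (what is proved, stated in full; the proofs are below) =====
def Claim_equal_ordinary_polynomial_value_calc : Prop := ∀ (coeff : List Int) (arg : Int), Dom_ordinary_polynomial_value_calc coeff arg → Spec_ordinary_polynomial_value_calc coeff arg (ordinary_polynomial_value_calc coeff arg)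

-- ===== LEMMAS AND PROOFS =====

-- the Horner-free sum Σ_{j} arg^(k+j) * l[j], the common value of both ports
def pvS (arg : Int) : List Int → Nat → Int
  | [], _ => 0
  | c :: l, k => arg ^ k * c + pvS arg l (k + 1)

-- ---- B side ----

theorem alt_fold_inv (arg : Int) (l : List Int) : ∀ (k : Nat) (v cm ca : Int), 1 ≤ k →
    l.foldl
      (fun (s : Int × Int × Int × Int × Int) (c : Int) =>
        let (value, power, cm, ca, i) := s
        let (power, cm) := if i > 0 then (power * arg, cm + 1) else (power, cm)
        (value + power * c, power, cm + 1, ca + 1, i + 1))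
      (v, arg ^ (k - 1), cm, ca, (k : Int))
    = (v + pvS arg l k, arg ^ (k + l.length - 1), cm + 2 * l.length, ca + l.length, (k : Int) + l.length) := by
  induction l with
  | nil => intro k v cm ca hk; simp [pvS]
  | cons c l ih =>
    intro k v cm ca hk
    simp only [List.foldl_cons]
    have hi : ((k : Int) > 0) := by exact_mod_cast hk
    have hpow : arg ^ (k - 1) * arg = arg ^ k := by
      rw [← pow_succ]; congr 1; omega
    simp only [if_pos hi, hpow]
    have hcast : ((k : Int) + 1) = ((k + 1 : Nat) : Int) := by push_cast; ring
    rw [hcast]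
    have := ih (k + 1) (v + arg ^ k * c) (cm + 1 + 1) (ca + 1) (by omega)
    simp only [Nat.add_sub_cancel] at this
    rw [this, pvS]
    simp only [List.length_cons, Prod.mk.injEq]
    refine ⟨by ring_nf, by congr 1; omega, by push_cast; ring_nf, by push_cast; ring_nf, by push_cast; ring_nf⟩

theorem alt_closed (coeff : List Int) (arg : Int) :
    ordinary_polynomial_value_calc_alt coeff arg
    = (pvS arg coeff 0,
       if coeff.length = 0 then 0 else 2 * (coeff.length : Int) - 1,
       (coeff.length : Int)) := by
  cases coeff with
  | nil => simp [ordinary_polynomial_value_calc_alt, pvS]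
  | cons c l =>
    unfold ordinary_polynomial_value_calc_alt
    simp only [List.foldl_cons]
    have h0 : ¬ ((0 : Int) > 0) := by omega
    simp only [if_neg h0]
    have key := alt_fold_inv arg l 1 (0 + 1 * c) (0 + 1) (0 + 1) (le_refl 1)
    norm_num at key ⊢
    rw [key, pvS]
    refine ⟨by norm_num, by ring, by ring⟩

-- ---- A side ----

-- sum/count pass: the paired fold is (sum, length)
theorem sumcount_fold (l : List Int) : ∀ (v c : Int),
    l.foldl (fun (s : Int × Int) (x : Int) => (s.1 + x, s.2 + 1)) (v, c)
    = (v + l.sum, c + l.length) := by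
  induction l with
  | nil => intro v c; simp
  | cons x l ih =>
    intro v c
    simp only [List.foldl_cons, ih, List.sum_cons, List.length_cons, Prod.mk.injEq]
    constructor <;> (push_cast; ring_nf)

-- the tab_x-building fold: the counter part is just the length
theorem tab_fold_pair (arg : Int) (l : List Int) : ∀ (t : List Int) (c : Int),
    l.foldl
      (fun (s : List Int × Int) (i : Int) =>
        (PySem.List.pySetD s.1 i (PySem.List.pyGetD s.1 (i - 1) 0 * arg), s.2 + 1))
      (t, c)
    = (l.foldl (fun t i => PySem.List.pySetD t i (PySem.List.pyGetD t (i - 1) 0 * arg)) t, c + l.length) := by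
  induction l with
  | nil => intro t c; simp
  | cons x l ih =>
    intro t c
    simp only [List.foldl_cons, ih, List.length_cons, Prod.mk.injEq]
    exact ⟨trivial, by push_cast; ring_nf⟩

-- the tab_x list after the first m-1 iterations
theorem tab_fold_list (arg : Int) (n : Nat) : ∀ (m : Nat), m ≤ n →
    (PySem.List.pyRange 1 (m : Int) 1).foldl
      (fun t i => PySem.List.pySetD t i (PySem.List.pyGetD t (i - 1) 0 * arg))
      ((List.range n).map (fun _ => (1 : Int)))
    = (List.range n).map (fun i => if 0 < i ∧ i < m then arg ^ i else 1) := by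
  intro m
  induction m with
  | zero =>
    intro _
    rw [PySem.List.pyRange_one_eq_nil (by omega)]
    simp
  | succ m ih =>
    intro hm
    by_cases h1 : 1 ≤ m
    · rw [show ((m + 1 : Nat) : Int) = (m : Int) + 1 by push_cast; ring,
          PySem.List.pyRange_one_succ_right (by exact_mod_cast h1), List.foldl_append,
          ih (by omega)]
      simp only [List.foldl_cons, List.foldl_nil]
      have hsub : (m : Int) - 1 = ((m - 1 : Nat) : Int) := by omega
      rw [hsub, PySem.List.pyGetD_natCast, PySem.List.pySetD_natCast]
      have hm1 : m - 1 < n := by omega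
      have hget : ((List.range n).map (fun i => if 0 < i ∧ i < m then arg ^ i else 1)).getD (m - 1) 0
          = if 0 < m - 1 ∧ m - 1 < m then arg ^ (m - 1) else 1 := by
        rw [List.getD_eq_getElem _ _ (by simpa using hm1)]
        simp only [List.getElem_map, List.getElem_range]
      rw [hget]
      have hval : (if 0 < m - 1 ∧ m - 1 < m then arg ^ (m - 1) else 1) * arg = arg ^ m := by
        by_cases h2 : 2 ≤ m
        · rw [if_pos ⟨by omega, by omega⟩, ← pow_succ]; congr 1; omega
        · have : m = 1 := by omega
          subst this; norm_num
      rw [hval]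
      apply List.ext_getElem
      · simp
      · intro i h₁ h₂
        simp only [List.getElem_set, List.getElem_map, List.getElem_range]
        by_cases hieq : m = i
        · rw [if_pos hieq]
          rw [if_pos (by omega)]
          subst hieq; rfl
        · rw [if_neg hieq]
          by_cases hc : 0 < i ∧ i < m
          · rw [if_pos hc, if_pos (by omega)]
          · rw [if_neg hc, if_neg (by omega)]
    · -- m = 0 : range(1, 1) is empty, and the if-condition is everywhere false on both sides
      have hm0 : m = 0 := by omega
      subst hm0
      rw [show ((0 + 1 : Nat) : Int) = 1 by norm_num, PySem.List.pyRange_one_eq_nil (by omega)]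
      simp only [List.foldl_nil]
      apply List.map_congr_left
      intro i _
      rw [if_neg (by omega)]

-- the sum of A's components list is pvS
theorem sum_components (arg : Int) (l : List Int) : ∀ (k : Nat),
    ((List.range l.length).map (fun j => arg ^ (k + j) * l.getD j 0)).sum = pvS arg l k := by
  induction l with
  | nil => intro k; simp [pvS]
  | cons c l ih =>
    intro k
    rw [List.length_cons, List.range_succ_eq_map, List.map_cons, List.map_map, List.sum_cons]
    rw [pvS, ← ih (k + 1)]
    have hmap : List.map ((fun j => arg ^ (k + j) * (c :: l).getD j 0) ∘ Nat.succ) (List.range l.length)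
        = List.map (fun j => arg ^ (k + 1 + j) * l.getD j 0) (List.range l.length) := by
      apply List.map_congr_left
      intro j _
      simp only [Function.comp_apply, List.getD_cons_succ]
      rw [show k + (j + 1) = k + 1 + j from by omega]
    rw [hmap]
    simp

-- the summation pass of A
theorem final_fold (xs : List Int) (n : Nat) (h : xs.length = n) :
    (PySem.List.pyRange 0 (n : Int) 1).foldl
      (fun (s : Int × Int) (i : Int) => (s.1 + PySem.List.pyGetD xs i 0, s.2 + 1)) (0, 0)
    = (xs.sum, (n : Int)) := by
  subst h
  rw [PySem.List.foldl_pyRange_zero_pyGetD' xs 0 (fun (s : Int × Int) (x : Int) => (s.1 + x, s.2 + 1)) (0, 0)]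
  rw [sumcount_fold]
  norm_num

theorem a_closed (coeff : List Int) (arg : Int) :
    ordinary_polynomial_value_calc coeff arg
    = (pvS arg coeff 0,
       if coeff.length = 0 then 0 else 2 * (coeff.length : Int) - 1,
       (coeff.length : Int)) := by
  simp only [ordinary_polynomial_value_calc]
  have htab0 : coeff.map (fun _ => (1 : Int)) = (List.range coeff.length).map (fun _ => (1 : Int)) := by
    apply List.ext_getElem <;> simp
  rw [htab0, tab_fold_pair, tab_fold_list arg coeff.length coeff.length (le_refl _)]
  have hcomp : (PySem.List.pyRange 0 (coeff.length : Int) 1).map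
      (fun i => PySem.List.pyGetD ((List.range coeff.length).map (fun i => if 0 < i ∧ i < coeff.length then arg ^ i else 1)) i 0 * PySem.List.pyGetD coeff i 0)
      = (List.range coeff.length).map (fun j => arg ^ (0 + j) * coeff.getD j 0) := by
    rw [PySem.List.pyRange_one, List.map_map]
    rw [show ((coeff.length : Int) - 0).toNat = coeff.length from by omega]
    apply List.map_congr_left
    intro j hj
    simp only [Function.comp_apply, zero_add, PySem.List.pyGetD_natCast]
    have hjlt : j < coeff.length := List.mem_range.mp hj
    congr 1
    rw [List.getD_eq_getElem _ _ (by simpa using hjlt)]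
    simp only [List.getElem_map, List.getElem_range]
    by_cases h0 : 0 < j
    · rw [if_pos ⟨h0, hjlt⟩]
    · have : j = 0 := by omega
      subst this; norm_num
  rw [hcomp]
  rw [final_fold _ coeff.length (by simp)]
  rw [sum_components arg coeff 0]
  simp only [Prod.mk.injEq, PySem.List.length_pyRange_one]
  refine ⟨by simp, ?_, trivial⟩
  by_cases h : coeff.length = 0
  · simp [h]
  · rw [if_neg h]; omega

-- ===== VERDICT (by name: the statement is the Claim_ definition above) =====
theorem ordinary_polynomial_value_calc_spec : Claim_equal_ordinary_polynomial_value_calc := by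
  intro coeff arg _
  unfold Spec_ordinary_polynomial_value_calc
  rw [a_closed, alt_closed]
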